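-- pv_equiv track=rewrite | github.com/newsundram2018/Python-Programs | PractiseProblemsPython/26.py | check_occurence
-- ===== SOURCE A (Python) =====
-- def check_occurence(string):
--     #start writing your code here
--     count_Jet=0
--     count_met=0
--     string=string.lower()
--     for i in string.split():
--         if i=='jet':
--             count_Jet+=1
--         elif i=='mat':
--             count_met+=1
--     if count_met==count_Jet:
--         return True
--     return False
-- ===== SOURCE B (Python) =====
-- def check_occurence(string):
--     # Pair-cancellation: a 'jet' annihilates a pending 'mat' and vice versa;
--     # the counts are equal exactly when no token is left unmatched.
--     stack = []
--     for w in string.lower().split():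
--         if w == 'jet':
--             if stack and stack[-1] == 'mat':
--                 stack.pop()
--             else:
--                 stack.append('jet')
--         elif w == 'mat':
--             if stack and stack[-1] == 'jet':
--                 stack.pop()
--             else:
--                 stack.append('mat')
--     return not stack
-- ===== Notes on version B (the rewrite author's own statement) =====
-- stated objective: alternative
-- what changed: Replaces the two-counter tally-and-compare with a pair-cancellation stack: each 'jet' annihilates a pending 'mat' (and vice versa) and equality of counts is read off as the stack ending empty.
import Mathlib
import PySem

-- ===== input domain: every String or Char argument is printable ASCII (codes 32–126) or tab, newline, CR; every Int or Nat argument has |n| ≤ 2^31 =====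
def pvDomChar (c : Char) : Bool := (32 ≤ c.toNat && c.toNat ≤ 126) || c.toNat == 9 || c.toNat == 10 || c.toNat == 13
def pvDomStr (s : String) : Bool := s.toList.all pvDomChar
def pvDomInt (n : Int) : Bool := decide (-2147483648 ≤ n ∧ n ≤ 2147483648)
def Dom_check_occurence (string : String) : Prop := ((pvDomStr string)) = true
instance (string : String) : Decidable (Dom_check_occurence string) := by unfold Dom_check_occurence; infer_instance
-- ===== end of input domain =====

-- B replaces the two-counter tally-and-compare with a pair-cancellation stack
-- ('jet' annihilates a pending 'mat' and vice versa; counts equal ↔ stack empty); same cost.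

-- ===== PORT A =====
def check_occurence (string : String) : Bool :=
  let count_Jet : Int := 0
  let count_met : Int := 0
  let string := PySem.Str.lower string
  let (count_Jet, count_met) :=
    (PySem.Str.split₀ string).foldl
      (fun (acc : Int × Int) i =>
        if i == "jet" then (acc.1 + 1, acc.2)
        else if i == "mat" then (acc.1, acc.2 + 1)
        else acc)
      (count_Jet, count_met)
  if count_met == count_Jet then true else false

-- ===== PORT B =====
-- The Lean list's HEAD models the Python stack's top (stack[-1]); Python's
-- 'stack and stack[-1] == w' test is exactly 'stack.head? == some w'.
def check_occurence_alt (string : String) : Bool :=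
  let stack : List String := []
  let stack :=
    (PySem.Str.split₀ (PySem.Str.lower string)).foldl
      (fun (stack : List String) w =>
        if w == "jet" then
          if stack.head? == some "mat" then stack.tail else "jet" :: stack
        else if w == "mat" then
          if stack.head? == some "jet" then stack.tail else "mat" :: stack
        else stack)
      stack
  stack.isEmpty

-- ===== PRECONDITION & SPEC =====
def Spec_check_occurence (string : String) (out : Bool) : Prop := out = check_occurence_alt string
instance (string : String) (out : Bool) : Decidable (Spec_check_occurence string out) := by unfold Spec_check_occurence; infer_instance

-- ===== CLAIM (what is proved, stated in full; the proofs are below) =====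
def Claim_equal_check_occurence : Prop := ∀ (string : String), Dom_check_occurence string → Spec_check_occurence string (check_occurence string)

-- ===== LEMMAS AND PROOFS =====

-- canonical stack holding a signed jet/mat balance d
def pvStackOf (d : Int) : List String :=
  if 0 ≤ d then List.replicate d.toNat "jet" else List.replicate (-d).toNat "mat"

def pvStep (stack : List String) (w : String) : List String :=
  if w == "jet" then
    if stack.head? == some "mat" then stack.tail else "jet" :: stack
  else if w == "mat" then
    if stack.head? == some "jet" then stack.tail else "mat" :: stack
  else stack

theorem pvStep_jet (d : Int) : pvStep (pvStackOf d) "jet" = pvStackOf (d + 1) := by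
  unfold pvStep pvStackOf
  by_cases h : 0 ≤ d
  · have h1 : 0 ≤ d + 1 := by omega
    have ht : (d + 1).toNat = d.toNat + 1 := by omega
    cases hn : d.toNat <;> simp [h, h1, ht, hn, List.replicate_succ]
  · have hn : (-d).toNat = ((-d).toNat - 1) + 1 := by omega
    by_cases h1 : 0 ≤ d + 1
    · have hd : d = -1 := by omega
      subst hd; simp [List.replicate_succ]
    · rw [hn]
      simp [h, h1, List.replicate_succ]
      omega

theorem pvStep_mat (d : Int) : pvStep (pvStackOf d) "mat" = pvStackOf (d - 1) := by
  unfold pvStep pvStackOf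
  by_cases h : 0 ≤ d
  · by_cases h1 : 0 ≤ d - 1
    · have hn : d.toNat = (d.toNat - 1) + 1 := by omega
      have ht : (d - 1).toNat = d.toNat - 1 := by omega
      rw [hn]
      simp [h, ht, List.replicate_succ]
      omega
    · have hd : d = 0 := by omega
      subst hd; simp [List.replicate_succ]
  · have h1 : ¬ 1 ≤ d := by omega
    have ht : (1 - d).toNat = (-d).toNat + 1 := by omega
    cases hn : (-d).toNat <;>
      simp [h, h1, ht, hn, List.replicate_succ]

theorem pvStep_other (s : List String) (w : String) (hj : w ≠ "jet") (hm : w ≠ "mat") :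
    pvStep s w = s := by
  simp [pvStep, hj, hm]

theorem pv_foldl_stack (l : List String) : ∀ (d : Int),
    l.foldl pvStep (pvStackOf d)
      = pvStackOf (d + (l.count "jet" : Int) - (l.count "mat" : Int)) := by
  induction l with
  | nil => intro d; simp
  | cons x xs ih =>
    intro d
    rw [List.foldl_cons]
    by_cases hj : x = "jet"
    · subst hj
      rw [pvStep_jet, ih]
      congr 1
      simp
      omega
    · by_cases hm : x = "mat"
      · subst hm
        rw [pvStep_mat, ih]
        congr 1
        simp
        omega
      · rw [pvStep_other _ _ hj hm, ih]
        congr 1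
        simp [hj, hm]

theorem pvStackOf_eq_nil (d : Int) : pvStackOf d = [] ↔ d = 0 := by
  unfold pvStackOf
  by_cases h : 0 ≤ d <;> simp [h] <;> omega

theorem pv_foldl_pair (l : List String) : ∀ (a b : Int),
    l.foldl
      (fun (acc : Int × Int) i =>
        if i == "jet" then (acc.1 + 1, acc.2)
        else if i == "mat" then (acc.1, acc.2 + 1)
        else acc)
      (a, b) = (a + l.count "jet", b + l.count "mat") := by
  induction l with
  | nil => intro a b; simp
  | cons x xs ih =>
    intro a b
    rw [List.foldl_cons]
    by_cases hj : (x == "jet") = true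
    · rw [if_pos hj, ih]
      have hx : x = "jet" := by simpa using hj
      subst hx
      simp [Prod.ext_iff]
      omega
    · rw [if_neg hj]
      by_cases hm : (x == "mat") = true
      · rw [if_pos hm, ih]
        have hx : x = "mat" := by simpa using hm
        subst hx
        simp [Prod.ext_iff]
        omega
      · rw [if_neg hm, ih]
        have hx1 : ¬ x = "jet" := by simpa using hj
        have hx2 : ¬ x = "mat" := by simpa using hm
        simp [hx1, hx2]

-- ===== VERDICT (by name: the statement is the Claim_ definition above) =====
theorem check_occurence_spec : Claim_equal_check_occurence := by
  intro s _
  unfold Spec_check_occurence check_occurence check_occurence_alt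
  dsimp only
  rw [pv_foldl_pair]
  have hB : ([] : List String) = pvStackOf 0 := by simp [pvStackOf]
  rw [show (fun (stack : List String) w =>
        if w == "jet" then
          if stack.head? == some "mat" then stack.tail else "jet" :: stack
        else if w == "mat" then
          if stack.head? == some "jet" then stack.tail else "mat" :: stack
        else stack) = pvStep from rfl, hB, pv_foldl_stack]
  set cj := ((PySem.Str.split₀ (PySem.Str.lower s)).count "jet" : Int)
  set cm := ((PySem.Str.split₀ (PySem.Str.lower s)).count "mat" : Int)
  by_cases h : cm = cj
  · simp [h, pvStackOf]
  · have hne : cj - cm ≠ 0 := by omega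
    have h2 : pvStackOf (cj - cm) ≠ [] := fun he => hne ((pvStackOf_eq_nil _).mp he)
    simp [h, h2]
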